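-- pv_equiv track=rewrite | github.com/cauchy221/Alignment-Whack-a-Mole-Code | evaluation/memorization_eval_metrics.py | _trim_instruction_kgrams
-- ===== SOURCE A (Python) =====
-- from typing import List, Tuple, Dict, Any, Optional
--
-- def _merge_intervals(intervals: List[Tuple[int, int]]) -> List[Tuple[int, int]]:
--     """Merge overlapping or adjacent [start, end) intervals."""
--     if not intervals:
--         return []
--     intervals = sorted(intervals)
--     merged = [intervals[0]]
--     for s, e in intervals[1:]:
--         if s <= merged[-1][1]:
--             merged[-1] = (merged[-1][0], max(merged[-1][1], e))
--         else:
--             merged.append((s, e))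
--     return merged
--
-- def _subtract_from_interval(
--     base: Tuple[int, int], removes: List[Tuple[int, int]]
-- ) -> List[Tuple[int, int]]:
--     """Subtract a set of intervals from a base interval, returning remaining pieces."""
--     s, e = base
--     clamped = [(max(s, a), min(e, b)) for a, b in removes if not (b <= s or a >= e)]
--     rm = _merge_intervals([r for r in clamped if r[0] < r[1]])
--     if not rm:
--         return [base]
--     out, cur = [], s
--     for a, b in rm:
--         if cur < a:
--             out.append((cur, a))
--         cur = max(cur, b)
--     if cur < e:
--         out.append((cur, e))
--     return out
--
-- def _kset(words: List[str], k: int):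
--     """Build the set of all k-grams (as tuples) from a word list."""
--     if k <= 0:
--         return set()
--     return {tuple(words[i : i + k]) for i in range(len(words) - k + 1)}
--
-- def _trim_instruction_kgrams(
--     gold_words: List[str],
--     instr_words: List[str],
--     intervals: List[Tuple[int, int]],
--     min_length: int,
--     k_for_exclusion: int,
-- ) -> List[Tuple[int, int]]:
--     """Remove positions whose m-gram overlaps with the instruction, keep sub-spans >= min_length.
--
--     This implements the instruction trimming step in Algorithm 1 (lines 7-9):
--     for each matched span, any position where the surrounding m-gram also
--     appears in the instruction is removed.  The remaining sub-spans are
--     retained only if they are >= min_length words.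
--     """
--     all_trimmed: List[Tuple[int, int]] = []
--     for raw_iv in intervals:
--         s, e = raw_iv
--         span_len = e - s
--         if k_for_exclusion <= 0 or span_len < k_for_exclusion:
--             if span_len >= min_length:
--                 all_trimmed.append(raw_iv)
--             continue
--         instr_k = _kset(instr_words, k_for_exclusion)
--         removes = []
--         for i in range(span_len - k_for_exclusion + 1):
--             kg = tuple(gold_words[s + i : s + i + k_for_exclusion])
--             if kg in instr_k:
--                 removes.append((s + i, s + i + k_for_exclusion))
--         removes = _merge_intervals(removes)
--         for start, end in _subtract_from_interval(raw_iv, removes):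
--             if end - start >= min_length:
--                 all_trimmed.append((start, end))
--     return _merge_intervals(all_trimmed)
-- ===== SOURCE B (Python) =====
-- from typing import List, Tuple
--
-- def _merge(ivs):
--     """Merge sorted-coalesce with an explicit (a, b) running interval."""
--     if not ivs:
--         return []
--     ivs = sorted(ivs)
--     (a, b), out = ivs[0], []
--     for x, y in ivs[1:]:
--         if x <= b:
--             b = max(b, y)
--         else:
--             out.append((a, b))
--             a, b = x, y
--     out.append((a, b))
--     return out
--
-- def _trim_instruction_kgrams(
--     gold_words: List[str],
--     instr_words: List[str],
--     intervals: List[Tuple[int, int]],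
--     min_length: int,
--     k_for_exclusion: int,
-- ) -> List[Tuple[int, int]]:
--     k = k_for_exclusion
--     instr_k = set()
--     if k > 0 and any(e - s >= k for s, e in intervals):
--         instr_k = {tuple(instr_words[i:i + k]) for i in range(len(instr_words) - k + 1)}
--     kept: List[Tuple[int, int]] = []
--     for s, e in intervals:
--         span_len = e - s
--         if k <= 0 or span_len < k:
--             if span_len >= min_length:
--                 kept.append((s, e))
--             continue
--         # single pass: cur = start of the current kept run; a matching k-gram
--         # at absolute position s+i closes the run [cur, s+i) and skips to s+i+k
--         cur = s
--         for i in range(span_len - k + 1):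
--             if tuple(gold_words[s + i:s + i + k]) in instr_k:
--                 if cur < s + i and s + i - cur >= min_length:
--                     kept.append((cur, s + i))
--                 cur = max(cur, s + i + k)
--         if cur < e and e - cur >= min_length:
--             kept.append((cur, e))
--     return _merge(kept)
-- ===== Notes on version B (the rewrite author's own statement) =====
-- stated objective: alternative
-- what changed: B replaces A's per-span build-removes/merge-intervals/subtract-from-interval pipeline with a single fused left-to-right scan that tracks the start of the current kept run and emits qualifying sub-spans directly, and builds the instruction k-gram set once (only when some span needs it) instead of once per qualifying span; the final merge of kept spans is retained.
import Mathlib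
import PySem

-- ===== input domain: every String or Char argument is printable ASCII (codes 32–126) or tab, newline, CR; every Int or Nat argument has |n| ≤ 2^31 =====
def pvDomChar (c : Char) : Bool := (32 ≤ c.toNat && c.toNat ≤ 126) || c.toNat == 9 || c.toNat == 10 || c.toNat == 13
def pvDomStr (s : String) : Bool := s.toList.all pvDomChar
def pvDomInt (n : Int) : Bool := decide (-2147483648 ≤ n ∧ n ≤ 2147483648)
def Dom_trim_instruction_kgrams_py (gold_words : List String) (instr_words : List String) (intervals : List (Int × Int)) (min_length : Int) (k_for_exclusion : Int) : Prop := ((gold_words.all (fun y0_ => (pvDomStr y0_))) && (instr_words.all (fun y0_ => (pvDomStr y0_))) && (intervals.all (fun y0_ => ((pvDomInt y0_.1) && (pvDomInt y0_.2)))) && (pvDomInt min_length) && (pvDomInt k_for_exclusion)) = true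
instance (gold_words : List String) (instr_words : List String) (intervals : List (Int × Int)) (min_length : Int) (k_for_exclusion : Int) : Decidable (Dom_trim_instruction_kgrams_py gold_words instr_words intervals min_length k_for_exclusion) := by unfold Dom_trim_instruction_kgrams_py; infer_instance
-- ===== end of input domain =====

-- ===== PORT A =====
-- B (trim_instruction_kgrams_py_alt) replaces the per-span removes/merge/subtract pipeline with one fused kept-run scan and builds the instruction k-gram set at most once; same return value, proved below.
def pv_merge_intervals (intervals : List (Int × Int)) : List (Int × Int) :=
  if intervals = [] then []
  else
    match PySem.List.sorted2 intervals Prod.fst Prod.snd with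
    | [] => []
    | iv0 :: rest =>
      -- Python mutates merged[-1]; the accumulator is kept reversed (head = merged[-1])
      (rest.foldl (fun mergedRev se =>
        match mergedRev with
        | [] => [se]
        | last :: prev =>
          if se.1 ≤ last.2 then (last.1, max last.2 se.2) :: prev
          else se :: last :: prev) [iv0]).reverse

def pv_subtract (base : Int × Int) (removes : List (Int × Int)) : List (Int × Int) :=
  let s := base.1
  let e := base.2
  let clamped := (removes.filter (fun ab => !(decide (ab.2 ≤ s) || decide (e ≤ ab.1)))).map
      (fun ab => (max s ab.1, min e ab.2))
  let rm := pv_merge_intervals (clamped.filter (fun r => decide (r.1 < r.2)))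
  if rm = [] then [base]
  else
    let oc := rm.foldl (fun (oc : List (Int × Int) × Int) ab =>
      ((if oc.2 < ab.1 then oc.1 ++ [(oc.2, ab.1)] else oc.1), max oc.2 ab.2)) ([], s)
    if oc.2 < e then oc.1 ++ [(oc.2, e)] else oc.1

def pv_kset (words : List String) (k : Int) : PySem.Set (List String) :=
  if k ≤ 0 then []
  else PySem.Set.ofList ((PySem.List.pyRange 0 ((words.length : Int) - k + 1) 1).map
    (fun i => PySem.List.slice words (some i) (some (i + k))))

def trim_instruction_kgrams_py (gold_words : List String) (instr_words : List String) (intervals : List (Int × Int)) (min_length : Int) (k_for_exclusion : Int) : List (Int × Int) :=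
  let all_trimmed := intervals.foldl (fun all_trimmed raw_iv =>
    let s := raw_iv.1
    let e := raw_iv.2
    let span_len := e - s
    if k_for_exclusion ≤ 0 ∨ span_len < k_for_exclusion then
      if span_len ≥ min_length then all_trimmed ++ [raw_iv] else all_trimmed
    else
      let instr_k := pv_kset instr_words k_for_exclusion
      let removes := (PySem.List.pyRange 0 (span_len - k_for_exclusion + 1) 1).foldl
        (fun removes i =>
          if PySem.List.slice gold_words (some (s + i)) (some (s + i + k_for_exclusion)) ∈ instr_k
          then removes ++ [(s + i, s + i + k_for_exclusion)] else removes) []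
      (pv_subtract raw_iv (pv_merge_intervals removes)).foldl
        (fun acc piece => if piece.2 - piece.1 ≥ min_length then acc ++ [piece] else acc)
        all_trimmed) []
  pv_merge_intervals all_trimmed

-- ===== PORT B =====
def pv_merge_alt (ivs : List (Int × Int)) : List (Int × Int) :=
  match PySem.List.sorted2 ivs Prod.fst Prod.snd with
  | [] => []
  | ab :: rest =>
    let st := rest.foldl (fun (st : List (Int × Int) × Int × Int) xy =>
      if xy.1 ≤ st.2.2 then (st.1, st.2.1, max st.2.2 xy.2)
      else (st.1 ++ [(st.2.1, st.2.2)], xy.1, xy.2)) ([], ab.1, ab.2)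
    st.1 ++ [(st.2.1, st.2.2)]

def trim_instruction_kgrams_py_alt (gold_words : List String) (instr_words : List String) (intervals : List (Int × Int)) (min_length : Int) (k_for_exclusion : Int) : List (Int × Int) :=
  let k := k_for_exclusion
  let instr_k : PySem.Set (List String) :=
    if 0 < k ∧ intervals.any (fun se => decide (se.2 - se.1 ≥ k)) then
      PySem.Set.ofList ((PySem.List.pyRange 0 ((instr_words.length : Int) - k + 1) 1).map
        (fun i => PySem.List.slice instr_words (some i) (some (i + k))))
    else []
  let kept := intervals.foldl (fun kept se =>
    let s := se.1
    let e := se.2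
    let span_len := e - s
    if k ≤ 0 ∨ span_len < k then
      if span_len ≥ min_length then kept ++ [(s, e)] else kept
    else
      let kc := (PySem.List.pyRange 0 (span_len - k + 1) 1).foldl
        (fun (kc : List (Int × Int) × Int) i =>
          if PySem.List.slice gold_words (some (s + i)) (some (s + i + k)) ∈ instr_k then
            ((if kc.2 < s + i ∧ s + i - kc.2 ≥ min_length then kc.1 ++ [(kc.2, s + i)] else kc.1),
              max kc.2 (s + i + k))
          else kc) (kept, s)
      if kc.2 < e ∧ e - kc.2 ≥ min_length then kc.1 ++ [(kc.2, e)] else kc.1) []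
  pv_merge_alt kept

-- ===== PRECONDITION & SPEC =====
def Spec_trim_instruction_kgrams_py (gold_words : List String) (instr_words : List String) (intervals : List (Int × Int)) (min_length : Int) (k_for_exclusion : Int) (out : List (Int × Int)) : Prop := out = trim_instruction_kgrams_py_alt gold_words instr_words intervals min_length k_for_exclusion
instance (gold_words : List String) (instr_words : List String) (intervals : List (Int × Int)) (min_length : Int) (k_for_exclusion : Int) (out : List (Int × Int)) : Decidable (Spec_trim_instruction_kgrams_py gold_words instr_words intervals min_length k_for_exclusion out) := by unfold Spec_trim_instruction_kgrams_py; infer_instance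

-- ===== CLAIM (what is proved, stated in full; the proofs are below) =====
def Claim_equal_trim_instruction_kgrams_py : Prop := ∀ (gold_words : List String) (instr_words : List String) (intervals : List (Int × Int)) (min_length : Int) (k_for_exclusion : Int), Dom_trim_instruction_kgrams_py gold_words instr_words intervals min_length k_for_exclusion → Spec_trim_instruction_kgrams_py gold_words instr_words intervals min_length k_for_exclusion (trim_instruction_kgrams_py gold_words instr_words intervals min_length k_for_exclusion)

-- ===== LEMMAS AND PROOFS =====

-- Reference recursive form of interval merging (proof-side only).
def mergeGo : Int × Int → List (Int × Int) → List (Int × Int)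
  | ab, [] => [ab]
  | ab, xy :: t => if xy.1 ≤ ab.2 then mergeGo (ab.1, max ab.2 xy.2) t else ab :: mergeGo xy t

def mergeRec : List (Int × Int) → List (Int × Int)
  | [] => []
  | ab :: t => mergeGo ab t

-- Reference form of the subtraction loop: emitted gaps plus the final cursor.
def subGaps : List (Int × Int) → Int → List (Int × Int) × Int
  | [], cur => ([], cur)
  | ab :: t, cur =>
    let r := subGaps t (max cur ab.2)
    ((if cur < ab.1 then [(cur, ab.1)] else []) ++ r.1, r.2)

theorem foldl_insertBy_sorted {α : Type} (before : α → α → Bool) :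
    ∀ (l acc : List α), (∀ x ∈ l, ∀ y ∈ acc, before x y = false) →
      l.Pairwise (fun a b => before b a = false) →
      l.foldl (fun acc x => PySem.List.insertBy before x acc) acc = acc ++ l := by
  intro l
  induction l with
  | nil => intro acc _ _; simp
  | cons x l ih =>
    intro acc h1 h2
    have hx : PySem.List.insertBy before x acc = acc ++ [x] :=
      PySem.List.insertBy_of_forall_not_before before x acc
        (fun y hy => h1 x (by simp) y hy)
    rw [List.foldl_cons, hx, ih (acc ++ [x])
      (fun z hz y hy => by
        rcases List.mem_append.mp hy with hy | hy
        · exact h1 z (by simp [hz]) y hy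
        · simp at hy; subst hy; exact (List.pairwise_cons.mp h2).1 z hz)
      (List.pairwise_cons.mp h2).2, List.append_assoc]
    rfl

theorem sorted2_eq_self (l : List (Int × Int)) (h : l.Pairwise (fun p q => p.1 < q.1)) :
    PySem.List.sorted2 l Prod.fst Prod.snd = l := by
  show l.foldl (fun acc x => PySem.List.insertBy _ x acc) [] = l
  rw [foldl_insertBy_sorted _ l [] (by simp)
    (h.imp (fun {p q} hpq => by
      simp only [if_neg (by simp : ¬ (false = true)), Bool.or_eq_false_iff,
        Bool.and_eq_false_iff, decide_eq_false_iff_not, Bool.not_eq_false',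
        decide_eq_true_eq]
      omega))]
  simp

theorem foldl_mergeA : ∀ (rest revOut : List (Int × Int)) (ab : Int × Int),
    (rest.foldl (fun mergedRev se =>
      match mergedRev with
      | [] => [se]
      | last :: prev =>
        if se.1 ≤ last.2 then (last.1, max last.2 se.2) :: prev
        else se :: last :: prev) (ab :: revOut)).reverse
    = revOut.reverse ++ mergeGo ab rest := by
  intro rest
  induction rest with
  | nil => intro revOut ab; simp [mergeGo]
  | cons xy t ih =>
    intro revOut ab
    simp only [List.foldl_cons, mergeGo]
    by_cases h : xy.1 ≤ ab.2
    · simp only [if_pos h]; exact ih revOut (ab.1, max ab.2 xy.2)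
    · simp only [if_neg h, ih (ab :: revOut) xy, List.reverse_cons, List.append_assoc,
        List.singleton_append]

theorem foldl_mergeB : ∀ (rest out : List (Int × Int)) (a b : Int),
    (fun st : List (Int × Int) × Int × Int => st.1 ++ [(st.2.1, st.2.2)])
      (rest.foldl (fun (st : List (Int × Int) × Int × Int) xy =>
        if xy.1 ≤ st.2.2 then (st.1, st.2.1, max st.2.2 xy.2)
        else (st.1 ++ [(st.2.1, st.2.2)], xy.1, xy.2)) (out, a, b))
    = out ++ mergeGo (a, b) rest := by
  intro rest
  induction rest with
  | nil => intro out a b; simp [mergeGo]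
  | cons xy t ih =>
    intro out a b
    simp only [List.foldl_cons, mergeGo]
    by_cases h : xy.1 ≤ b
    · simp only [if_pos h]; exact ih out a (max b xy.2)
    · simp only [if_neg h, ih (out ++ [(a, b)]) xy.1 xy.2, List.append_assoc,
        List.singleton_append]

theorem merge_eq_mergeRec (ivs : List (Int × Int)) :
    pv_merge_intervals ivs = mergeRec (PySem.List.sorted2 ivs Prod.fst Prod.snd) := by
  unfold pv_merge_intervals
  by_cases hivs : ivs = []
  · subst hivs; rfl
  · rw [if_neg hivs]
    rcases hs : PySem.List.sorted2 ivs Prod.fst Prod.snd with _ | ⟨iv0, rest⟩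
    · exact absurd (List.Perm.eq_nil (hs ▸ PySem.List.sorted2_perm ivs Prod.fst Prod.snd false).symm) hivs
    · simpa [mergeRec] using foldl_mergeA rest [] iv0

theorem merge_alt_eq_mergeRec (ivs : List (Int × Int)) :
    pv_merge_alt ivs = mergeRec (PySem.List.sorted2 ivs Prod.fst Prod.snd) := by
  unfold pv_merge_alt
  rcases hs : PySem.List.sorted2 ivs Prod.fst Prod.snd with _ | ⟨ab, rest⟩
  · rfl
  · simpa [mergeRec] using foldl_mergeB rest [] ab.1 ab.2

theorem mergeGo_first_le : ∀ (t : List (Int × Int)) (ab : Int × Int),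
    (ab :: t).Pairwise (fun p q => p.1 ≤ q.1) → ∀ p ∈ mergeGo ab t, ab.1 ≤ p.1 := by
  intro t
  induction t with
  | nil => intro ab _ p hp; simp [mergeGo] at hp; simp [hp]
  | cons xy t ih =>
    intro ab h p hp
    obtain ⟨h1, h2⟩ := List.pairwise_cons.mp h
    obtain ⟨h3, h4⟩ := List.pairwise_cons.mp h2
    simp only [mergeGo] at hp
    by_cases hc : xy.1 ≤ ab.2
    · rw [if_pos hc] at hp
      exact ih (ab.1, max ab.2 xy.2) (List.pairwise_cons.mpr ⟨fun z hz => h1 z (by simp [hz]), h4⟩) p hp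
    · rw [if_neg hc] at hp
      rcases List.mem_cons.mp hp with hp | hp
      · simp [hp]
      · exact le_trans (h1 xy (by simp)) (ih xy h2 p hp)

theorem mergeGo_bounds (lo hi : Int) : ∀ (t : List (Int × Int)) (ab : Int × Int),
    lo ≤ ab.1 → ab.1 < ab.2 → ab.2 ≤ hi →
    (∀ z ∈ t, lo ≤ z.1 ∧ z.1 < z.2 ∧ z.2 ≤ hi) →
    ∀ p ∈ mergeGo ab t, lo ≤ p.1 ∧ p.1 < p.2 ∧ p.2 ≤ hi := by
  intro t
  induction t with
  | nil => intro ab hle hab hhi _ p hp; simp [mergeGo] at hp; subst hp; exact ⟨hle, hab, hhi⟩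
  | cons xy t ih =>
    intro ab hle hab hhi ht p hp
    simp only [mergeGo] at hp
    by_cases hc : xy.1 ≤ ab.2
    · rw [if_pos hc] at hp
      have hxy := ht xy (by simp)
      exact ih (ab.1, max ab.2 xy.2) hle (lt_max_of_lt_left hab)
        (max_le hhi hxy.2.2) (fun z hz => ht z (by simp [hz])) p hp
    · rw [if_neg hc] at hp
      rcases List.mem_cons.mp hp with hp | hp
      · subst hp; exact ⟨hle, hab, hhi⟩
      · have hxy := ht xy (by simp)
        exact ih xy hxy.1 hxy.2.1 hxy.2.2 (fun z hz => ht z (by simp [hz])) p hp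

theorem mergeGo_pairwise : ∀ (t : List (Int × Int)) (ab : Int × Int),
    (ab :: t).Pairwise (fun p q => p.1 ≤ q.1) → ab.1 < ab.2 → (∀ z ∈ t, z.1 < z.2) →
    (mergeGo ab t).Pairwise (fun p q => p.1 < q.1) := by
  intro t
  induction t with
  | nil => intro ab _ _ _; simp [mergeGo]
  | cons xy t ih =>
    intro ab h hab hlt
    obtain ⟨h1, h2⟩ := List.pairwise_cons.mp h
    obtain ⟨h3, h4⟩ := List.pairwise_cons.mp h2
    simp only [mergeGo]
    by_cases hc : xy.1 ≤ ab.2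
    · rw [if_pos hc]
      exact ih (ab.1, max ab.2 xy.2)
        (List.pairwise_cons.mpr ⟨fun z hz => h1 z (by simp [hz]), h4⟩)
        (lt_max_of_lt_left hab) (fun z hz => hlt z (by simp [hz]))
    · rw [if_neg hc]
      refine List.pairwise_cons.mpr ⟨fun p hp => ?_, ih xy h2 (hlt xy (by simp))
        (fun z hz => hlt z (by simp [hz]))⟩
      exact lt_of_lt_of_le (lt_of_lt_of_le hab (le_of_not_ge fun hge => hc hge))
        (mergeGo_first_le t xy h2 p hp)

theorem subGaps_mergeGo : ∀ (t : List (Int × Int)) (ab : Int × Int) (cur : Int),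
    (ab :: t).Pairwise (fun p q => p.1 ≤ q.1) →
    subGaps (mergeGo ab t) cur = subGaps (ab :: t) cur := by
  intro t
  induction t with
  | nil => intro ab cur _; rfl
  | cons xy t ih =>
    intro ab cur h
    obtain ⟨h1, h2⟩ := List.pairwise_cons.mp h
    obtain ⟨h3, h4⟩ := List.pairwise_cons.mp h2
    simp only [mergeGo]
    by_cases hc : xy.1 ≤ ab.2
    · rw [if_pos hc,
        ih (ab.1, max ab.2 xy.2) cur
          (List.pairwise_cons.mpr ⟨fun z hz => h1 z (by simp [hz]), h4⟩)]
      simp only [subGaps]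
      have hgap : ¬ max cur ab.2 < xy.1 := not_lt.mpr (le_max_of_le_right hc)
      rw [if_neg hgap]
      have hmax : max (max cur ab.2) xy.2 = max cur (max ab.2 xy.2) := max_assoc cur ab.2 xy.2
      simp [hmax]
    · rw [if_neg hc]
      simp only [subGaps]
      rw [ih xy (max cur ab.2) h2]
      simp [subGaps]

theorem subGaps_mergeRec (R : List (Int × Int)) (cur : Int)
    (h : R.Pairwise (fun p q => p.1 ≤ q.1)) :
    subGaps (mergeRec R) cur = subGaps R cur := by
  rcases R with _ | ⟨ab, t⟩
  · rfl
  · exact subGaps_mergeGo t ab cur h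

theorem foldl_oc (rm : List (Int × Int)) : ∀ (out : List (Int × Int)) (cur : Int),
    rm.foldl (fun (oc : List (Int × Int) × Int) ab =>
      ((if oc.2 < ab.1 then oc.1 ++ [(oc.2, ab.1)] else oc.1), max oc.2 ab.2)) (out, cur)
    = (out ++ (subGaps rm cur).1, (subGaps rm cur).2) := by
  induction rm with
  | nil => intro out cur; simp [subGaps]
  | cons ab t ih =>
    intro out cur
    simp only [List.foldl_cons, subGaps]
    by_cases hc : cur < ab.1
    · rw [if_pos hc, ih, if_pos hc]; simp
    · rw [if_neg hc, ih, if_neg hc]; simp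



theorem foldl_guard_map {α β : Type} (M : α → Prop) [DecidablePred M] (f : α → β) :
    ∀ (L : List α) (acc : List β),
      L.foldl (fun r i => if M i then r ++ [f i] else r) acc
        = acc ++ (L.filter (fun i => decide (M i))).map f := by
  intro L
  induction L with
  | nil => intro acc; simp
  | cons x t ih =>
    intro acc
    simp only [List.foldl_cons, List.filter_cons]
    by_cases hx : M x
    · rw [if_pos hx, ih]; simp [hx]
    · rw [if_neg hx, ih]; simp [hx]

theorem mergeRec_ne_nil (R : List (Int × Int)) (h : R ≠ []) : mergeRec R ≠ [] := by
  rcases R with _ | ⟨ab, t⟩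
  · exact absurd rfl h
  · show mergeGo ab t ≠ []
    clear h
    induction t generalizing ab with
    | nil => simp [mergeGo]
    | cons xy t ih =>
      simp only [mergeGo]
      by_cases hc : xy.1 ≤ ab.2
      · rw [if_pos hc]; exact ih _
      · rw [if_neg hc]; simp

-- pv_subtract on a merged remove list that lies strictly inside the base.
theorem pv_subtract_eq (s e : Int) (hse : s < e) (R : List (Int × Int))
    (hb : ∀ p ∈ R, s ≤ p.1 ∧ p.1 < p.2 ∧ p.2 ≤ e)
    (hp : R.Pairwise (fun p q => p.1 < q.1)) :
    pv_subtract (s, e) R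
      = (subGaps R s).1 ++ (if (subGaps R s).2 < e then [((subGaps R s).2, e)] else []) := by
  unfold pv_subtract
  have hfil : R.filter (fun ab => !(decide (ab.2 ≤ s) || decide (e ≤ ab.1))) = R := by
    apply List.filter_eq_self.mpr
    intro ab hab
    obtain ⟨h1, h2, h3⟩ := hb ab hab
    simp only [Bool.not_eq_true', Bool.or_eq_false_iff, decide_eq_false_iff_not]
    omega
  have hmap : R.map (fun ab => (max s ab.1, min e ab.2)) = R := by
    conv_rhs => rw [show R = R.map id from (List.map_id R).symm]
    apply List.map_congr_left
    intro ab hab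
    obtain ⟨h1, h2, h3⟩ := hb ab hab
    simp [max_eq_right h1, min_eq_right h3]
  have hfil2 : R.filter (fun r => decide (r.1 < r.2)) = R := by
    apply List.filter_eq_self.mpr
    intro ab hab
    simp [(hb ab hab).2.1]
  simp only [hfil, hmap, hfil2]
  rw [merge_eq_mergeRec, sorted2_eq_self R hp]
  have hple : R.Pairwise (fun p q => p.1 ≤ q.1) := hp.imp (fun h => le_of_lt h)
  rcases hR : R with _ | ⟨ab, t⟩
  · simp [mergeRec, subGaps, if_pos hse]
  · rw [← hR]
    rw [if_neg (mergeRec_ne_nil R (by simp [hR]))]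
    rw [foldl_oc, subGaps_mergeRec R s hple]
    simp only [List.nil_append]
    by_cases hc : (subGaps R s).2 < e
    · rw [if_pos hc, if_pos hc]
    · rw [if_neg hc, if_neg hc]; simp

-- The fused scan of port B equals filtered subGaps over the remove list.
theorem fused_fold (s k ml : Int) (M : Int → Prop) [DecidablePred M] :
    ∀ (L : List Int) (kept : List (Int × Int)) (cur : Int),
      L.foldl (fun (kc : List (Int × Int) × Int) i =>
        if M i then
          ((if kc.2 < s + i ∧ s + i - kc.2 ≥ ml then kc.1 ++ [(kc.2, s + i)] else kc.1),
            max kc.2 (s + i + k))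
        else kc) (kept, cur)
      = (kept ++ ((subGaps ((L.filter (fun i => decide (M i))).map
            (fun i => (s + i, s + i + k))) cur).1).filter (fun p => decide (p.2 - p.1 ≥ ml)),
          (subGaps ((L.filter (fun i => decide (M i))).map (fun i => (s + i, s + i + k))) cur).2) := by
  intro L
  induction L with
  | nil => intro kept cur; simp [subGaps]
  | cons i t ih =>
    intro kept cur
    simp only [List.foldl_cons, List.filter_cons]
    by_cases hM : M i
    · rw [if_pos hM]
      simp only [hM, decide_true, if_true, List.map_cons, subGaps]
      by_cases hgap : cur < s + i
      · by_cases hml : s + i - cur ≥ ml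
        · rw [if_pos ⟨hgap, hml⟩, ih]
          simp [if_pos hgap, hml]
        · rw [if_neg (by tauto), ih]
          simp [if_pos hgap, hml]
      · rw [if_neg (by tauto), ih]
        simp [if_neg hgap]
    · rw [if_neg hM]
      simp only [hM, decide_false]
      exact ih kept cur

theorem mergeRec_bounds (lo hi : Int) (R : List (Int × Int))
    (h : ∀ z ∈ R, lo ≤ z.1 ∧ z.1 < z.2 ∧ z.2 ≤ hi) :
    ∀ p ∈ mergeRec R, lo ≤ p.1 ∧ p.1 < p.2 ∧ p.2 ≤ hi := by
  rcases R with _ | ⟨ab, t⟩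
  · simp [mergeRec]
  · have hab := h ab (by simp)
    exact mergeGo_bounds lo hi t ab hab.1 hab.2.1 hab.2.2 (fun z hz => h z (by simp [hz]))

theorem mergeRec_pairwise (R : List (Int × Int))
    (h1 : R.Pairwise (fun p q => p.1 < q.1)) (h2 : ∀ z ∈ R, z.1 < z.2) :
    (mergeRec R).Pairwise (fun p q => p.1 < q.1) := by
  rcases R with _ | ⟨ab, t⟩
  · simp [mergeRec]
  · exact mergeGo_pairwise t ab (h1.imp (fun h => le_of_lt h)) (h2 ab (by simp))
      (fun z hz => h2 z (by simp [hz]))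

theorem foldl_filter_minlen (ml : Int) :
    ∀ (L : List (Int × Int)) (acc : List (Int × Int)),
      L.foldl (fun r piece => if piece.2 - piece.1 ≥ ml then r ++ [piece] else r) acc
        = acc ++ L.filter (fun piece => decide (piece.2 - piece.1 ≥ ml)) := by
  intro L
  induction L with
  | nil => intro acc; simp
  | cons x t ih =>
    intro acc
    simp only [List.foldl_cons, List.filter_cons]
    by_cases hx : x.2 - x.1 ≥ ml
    · rw [if_pos hx, ih]; simp [hx]
    · rw [if_neg hx, ih]; simp [hx]

-- Per-span equality: port A's removes/merge/subtract/filter pipeline equals port B's fused scan.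
theorem span_eq (gw : List String) (S : PySem.Set (List String)) (ml k s e : Int)
    (hk : 0 < k) (hsp : k ≤ e - s) (acc : List (Int × Int)) :
    (pv_subtract (s, e) (pv_merge_intervals
        ((PySem.List.pyRange 0 (e - s - k + 1) 1).foldl
          (fun removes i =>
            if PySem.List.slice gw (some (s + i)) (some (s + i + k)) ∈ S
            then removes ++ [(s + i, s + i + k)] else removes) []))).foldl
      (fun acc piece => if piece.2 - piece.1 ≥ ml then acc ++ [piece] else acc) acc
    =
    (fun kc : List (Int × Int) × Int =>
       if kc.2 < e ∧ e - kc.2 ≥ ml then kc.1 ++ [(kc.2, e)] else kc.1)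
     ((PySem.List.pyRange 0 (e - s - k + 1) 1).foldl
       (fun (kc : List (Int × Int) × Int) i =>
         if PySem.List.slice gw (some (s + i)) (some (s + i + k)) ∈ S then
           ((if kc.2 < s + i ∧ s + i - kc.2 ≥ ml then kc.1 ++ [(kc.2, s + i)] else kc.1),
             max kc.2 (s + i + k))
         else kc) (acc, s)) := by
  have hse : s < e := by omega
  rw [foldl_guard_map (fun i => PySem.List.slice gw (some (s + i)) (some (s + i + k)) ∈ S)
    (fun i => (s + i, s + i + k)) (PySem.List.pyRange 0 (e - s - k + 1) 1) []]
  rw [fused_fold s k ml (fun i => PySem.List.slice gw (some (s + i)) (some (s + i + k)) ∈ S)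
    (PySem.List.pyRange 0 (e - s - k + 1) 1) acc s]
  set L := PySem.List.pyRange 0 (e - s - k + 1) 1 with hL
  set Rlist := (L.filter (fun i =>
      decide (PySem.List.slice gw (some (s + i)) (some (s + i + k)) ∈ S))).map
      (fun i => (s + i, s + i + k)) with hRl
  have hpw : Rlist.Pairwise (fun p q => p.1 < q.1) := by
    rw [hRl]
    refine List.Pairwise.map _ (fun a b hab => ?_)
      ((PySem.List.pairwise_lt_pyRange_one 0 (e - s - k + 1)).sublist List.filter_sublist)
    simpa using by omega
  have hbd : ∀ p ∈ Rlist, s ≤ p.1 ∧ p.1 < p.2 ∧ p.2 ≤ e := by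
    intro p hp
    rw [hRl] at hp
    obtain ⟨i, hi, hpi⟩ := List.mem_map.mp hp
    have hi' := List.mem_filter.mp hi
    have := (PySem.List.mem_pyRange_one).mp (hL ▸ hi'.1)
    subst hpi; simp only; omega
  rw [merge_eq_mergeRec, List.nil_append, sorted2_eq_self Rlist hpw]
  rw [pv_subtract_eq s e hse (mergeRec Rlist)
    (mergeRec_bounds s e Rlist hbd)
    (mergeRec_pairwise Rlist hpw (fun z hz => (hbd z hz).2.1))]
  rw [subGaps_mergeRec Rlist s (hpw.imp (fun h => le_of_lt h))]
  rw [foldl_filter_minlen ml]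
  simp only [List.filter_append]
  set c := (subGaps Rlist s).2 with hc
  set gaps := (subGaps Rlist s).1 with hg
  by_cases h1 : c < e
  · by_cases h2 : e - c ≥ ml
    · rw [if_pos (show c < e ∧ e - c ≥ ml from ⟨h1, h2⟩)]
      simp [if_pos h1, h2]
    · rw [if_neg (show ¬ (c < e ∧ e - c ≥ ml) by tauto)]
      simp [if_pos h1, h2]
  · rw [if_neg (show ¬ (c < e ∧ e - c ≥ ml) by tauto)]
    simp [if_neg h1]

-- Proof-side names for the two per-interval step functions (definitionally the ports' fold bodies).
def stepA (gold_words instr_words : List String) (min_length k_for_exclusion : Int)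
    (all_trimmed : List (Int × Int)) (raw_iv : Int × Int) : List (Int × Int) :=
  let s := raw_iv.1
  let e := raw_iv.2
  let span_len := e - s
  if k_for_exclusion ≤ 0 ∨ span_len < k_for_exclusion then
    if span_len ≥ min_length then all_trimmed ++ [raw_iv] else all_trimmed
  else
    let instr_k := pv_kset instr_words k_for_exclusion
    let removes := (PySem.List.pyRange 0 (span_len - k_for_exclusion + 1) 1).foldl
      (fun removes i =>
        if PySem.List.slice gold_words (some (s + i)) (some (s + i + k_for_exclusion)) ∈ instr_k
        then removes ++ [(s + i, s + i + k_for_exclusion)] else removes) []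
    (pv_subtract raw_iv (pv_merge_intervals removes)).foldl
      (fun acc piece => if piece.2 - piece.1 ≥ min_length then acc ++ [piece] else acc)
      all_trimmed

def stepB (gold_words : List String) (instr_k : PySem.Set (List String))
    (min_length k : Int) (kept : List (Int × Int)) (se : Int × Int) : List (Int × Int) :=
  let s := se.1
  let e := se.2
  let span_len := e - s
  if k ≤ 0 ∨ span_len < k then
    if span_len ≥ min_length then kept ++ [(s, e)] else kept
  else
    let kc := (PySem.List.pyRange 0 (span_len - k + 1) 1).foldl
      (fun (kc : List (Int × Int) × Int) i =>
        if PySem.List.slice gold_words (some (s + i)) (some (s + i + k)) ∈ instr_k then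
          ((if kc.2 < s + i ∧ s + i - kc.2 ≥ min_length then kc.1 ++ [(kc.2, s + i)] else kc.1),
            max kc.2 (s + i + k))
        else kc) (kept, s)
    if kc.2 < e ∧ e - kc.2 ≥ min_length then kc.1 ++ [(kc.2, e)] else kc.1

def ksetExpr (words : List String) (k : Int) : PySem.Set (List String) :=
  PySem.Set.ofList ((PySem.List.pyRange 0 ((words.length : Int) - k + 1) 1).map
    (fun i => PySem.List.slice words (some i) (some (i + k))))

theorem portA_eq (gw iw : List String) (ivs : List (Int × Int)) (ml k : Int) :
    trim_instruction_kgrams_py gw iw ivs ml k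
      = pv_merge_intervals (ivs.foldl (stepA gw iw ml k) []) := rfl

theorem portB_eq (gw iw : List String) (ivs : List (Int × Int)) (ml k : Int) :
    trim_instruction_kgrams_py_alt gw iw ivs ml k
      = pv_merge_alt (ivs.foldl (stepB gw
          (if 0 < k ∧ ivs.any (fun se => decide (se.2 - se.1 ≥ k)) then ksetExpr iw k else [])
          ml k) []) := rfl

theorem step_eq (gw iw : List String) (S : PySem.Set (List String)) (ml k : Int)
    (acc : List (Int × Int)) (iv : Int × Int)
    (hS : ¬ (k ≤ 0 ∨ iv.2 - iv.1 < k) → S = ksetExpr iw k) :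
    stepA gw iw ml k acc iv = stepB gw S ml k acc iv := by
  unfold stepA stepB
  by_cases hg : k ≤ 0 ∨ iv.2 - iv.1 < k
  · rw [if_pos hg, if_pos hg]
  · rw [if_neg hg, if_neg hg, hS hg]
    rw [not_or, not_le, not_lt] at hg
    obtain ⟨hk, hsp⟩ := hg
    have hA : pv_kset iw k = ksetExpr iw k := by
      unfold pv_kset ksetExpr
      rw [if_neg (by omega)]
    rw [hA]
    exact span_eq gw (ksetExpr iw k) ml k iv.1 iv.2 (by omega) (by omega) acc

theorem fold_eq (gw iw : List String) (ml k : Int) (full : List (Int × Int)) :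
    ∀ (ivs : List (Int × Int)), (∀ iv ∈ ivs, iv ∈ full) → ∀ (acc : List (Int × Int)),
      ivs.foldl (stepA gw iw ml k) acc
        = ivs.foldl (stepB gw
            (if 0 < k ∧ full.any (fun se => decide (se.2 - se.1 ≥ k)) then ksetExpr iw k else [])
            ml k) acc := by
  intro ivs
  induction ivs with
  | nil => intro _ acc; rfl
  | cons iv t ih =>
    intro hmem acc
    rw [List.foldl_cons, List.foldl_cons,
      step_eq gw iw
        (if 0 < k ∧ full.any (fun se => decide (se.2 - se.1 ≥ k)) then ksetExpr iw k else [])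
        ml k acc iv (fun hg => by
        rw [not_or, not_le, not_lt] at hg
        exact if_pos ⟨by omega, List.any_eq_true.mpr
          ⟨iv, hmem iv (by simp), by simpa using by omega⟩⟩),
      ih (fun z hz => hmem z (by simp [hz]))]

-- ===== VERDICT (by name: the statement is the Claim_ definition above) =====
theorem trim_instruction_kgrams_py_spec : Claim_equal_trim_instruction_kgrams_py := by
  intro gw iw ivs ml k _
  show trim_instruction_kgrams_py gw iw ivs ml k = trim_instruction_kgrams_py_alt gw iw ivs ml k
  rw [portA_eq, portB_eq, fold_eq gw iw ml k ivs ivs (fun _ h => h) [],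
    merge_alt_eq_mergeRec, merge_eq_mergeRec]
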